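-- pv_equiv track=rewrite | github.com/oliwiakaluzinska/prg-basics | 07-Arrays/3-34-2.py | f
-- ===== SOURCE A (Python) =====
-- def f(n):
--     array = [[0 for i in range(n)] for j in range(n)]
--     for i in range(len(array)):
--         for j in range(len(array[i])):
--             if i == j:
--                 array[i][j] = 1
--
--     result = ''
--     for i in array:
--         for j in i:
--             result += str(j) + ' '
--         result += '\n'
--     return result
-- ===== SOURCE B (Python) =====
-- def f(n):
--     result = ''
--     for i in range(n):
--         for j in range(n):
--             result += '1 ' if j == i else '0 '
--         result += '\n'
--     return result
-- ===== Notes on version B (the rewrite author's own statement) =====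
-- stated objective: simpler
-- what changed: B drops the intermediate n-by-n matrix entirely (no list construction, no diagonal-filling pass, no str() conversion) and emits the '1 '/'0 ' tokens directly from the two loop indices in a single formatting pass.
import Mathlib
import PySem

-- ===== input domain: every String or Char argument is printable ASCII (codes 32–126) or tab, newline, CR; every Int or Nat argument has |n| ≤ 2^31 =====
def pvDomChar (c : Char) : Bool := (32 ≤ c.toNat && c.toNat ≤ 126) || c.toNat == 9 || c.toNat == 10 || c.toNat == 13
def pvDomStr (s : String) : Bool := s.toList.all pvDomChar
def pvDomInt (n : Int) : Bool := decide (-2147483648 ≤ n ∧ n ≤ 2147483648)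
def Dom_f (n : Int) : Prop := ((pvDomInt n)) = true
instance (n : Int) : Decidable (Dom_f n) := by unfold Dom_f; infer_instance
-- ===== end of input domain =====

-- B drops A's intermediate n×n matrix (construction + diagonal-filling pass + str() conversion)
-- and emits the '1 '/'0 ' tokens directly from the two loop indices in one formatting pass (simpler).

-- ===== PORT A =====
def f (n : Int) : String :=
  let array0 : List (List Int) :=
    (PySem.List.pyRange 0 n 1).map (fun _j => (PySem.List.pyRange 0 n 1).map (fun _i => (0 : Int)))
  let array : List (List Int) :=
    (PySem.List.pyRange 0 (array0.length : Int) 1).foldl (fun arr i =>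
      (PySem.List.pyRange 0 ((PySem.List.pyGetD arr i []).length : Int) 1).foldl (fun arr2 j =>
        if i == j then arr2.set i.toNat ((PySem.List.pyGetD arr2 i []).set j.toNat 1) else arr2) arr)
      array0
  array.foldl (fun result i =>
    (i.foldl (fun r j => r ++ PySem.Int.toStr j ++ " ") result) ++ "\n") ""

-- ===== PORT B =====
def f_alt (n : Int) : String :=
  (PySem.List.pyRange 0 n 1).foldl (fun result i =>
    ((PySem.List.pyRange 0 n 1).foldl (fun r j =>
      r ++ (if j == i then "1 " else "0 ")) result) ++ "\n") ""

-- ===== PRECONDITION & SPEC =====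
def Spec_f (n : Int) (out : String) : Prop := out = f_alt n
instance (n : Int) (out : String) : Decidable (Spec_f n out) := by unfold Spec_f; infer_instance

-- ===== CLAIM (what is proved, stated in full; the proofs are below) =====
def Claim_equal_f : Prop := ∀ (n : Int), Dom_f n → Spec_f n (f n)

-- ===== LEMMAS AND PROOFS =====

-- the all-zeros row of A's initial matrix
def zrow (n : Int) : List Int := (PySem.List.pyRange 0 n 1).map (fun _i => (0 : Int))

-- the row with the 1 at position i
def irow (n i : Int) : List Int := (PySem.List.pyRange 0 n 1).map (fun j => if j == i then (1 : Int) else 0)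

theorem zrow_set (n i : Int) (h0 : 0 ≤ i) (_hi : i < n) :
    (zrow n).set i.toNat 1 = irow n i := by
  apply List.ext_getElem
  · simp [zrow, irow]
  · intro k h1 h2
    simp [zrow, irow, PySem.List.length_pyRange_one] at h1 h2 ⊢
    split_ifs with hs
    · rw [List.getElem_set, if_pos (by omega)]
    · rw [List.getElem_set, if_neg (by omega)]
      simp

theorem filter_eq_i (n i : Int) (h0 : 0 ≤ i) (hi : i < n) :
    (PySem.List.pyRange 0 n 1).filter (fun j => i == j) = [i] := by
  have hc : (fun j : Int => i == j) = (fun j => j == i) := by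
    funext j; by_cases h : i = j
    · simp [h]
    · simp [h, Ne.symm h]
  rw [hc, List.filter_beq, List.count_eq_one_of_mem (PySem.List.nodup_pyRange_one 0 n)
    (by rw [PySem.List.mem_pyRange_one]; exact ⟨h0, hi⟩)]
  rfl

-- A's inner loop: only the iteration j = i fires, turning row i (currently all zeros) into irow n i
theorem inner_loop_eq (n i : Int) (h0 : 0 ≤ i) (hi : i < n) (arr : List (List Int))
    (hget : PySem.List.pyGetD arr i [] = zrow n) :
    (PySem.List.pyRange 0 ((PySem.List.pyGetD arr i []).length : Int) 1).foldl (fun arr2 j =>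
        if i == j then arr2.set i.toNat ((PySem.List.pyGetD arr2 i []).set j.toNat 1) else arr2) arr
      = arr.set i.toNat (irow n i) := by
  have hlen : (((PySem.List.pyGetD arr i []).length : Int)) = n := by
    rw [hget]; simp [zrow, PySem.List.length_pyRange_one]; omega
  rw [hlen, PySem.List.foldl_if_eq_foldl_filter, filter_eq_i n i h0 hi]
  simp [List.foldl, hget, zrow_set n i h0 hi]

-- A's outer loop: after the first m iterations the first m rows are identity rows, the rest still zeros
theorem outer_loop_eq (n : Int) (m : Nat) (hm : (m : Int) ≤ n) :
    (PySem.List.pyRange 0 (m : Int) 1).foldl (fun arr i =>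
      (PySem.List.pyRange 0 ((PySem.List.pyGetD arr i []).length : Int) 1).foldl (fun arr2 j =>
        if i == j then arr2.set i.toNat ((PySem.List.pyGetD arr2 i []).set j.toNat 1) else arr2) arr)
      ((PySem.List.pyRange 0 n 1).map (fun _j => zrow n))
    = (PySem.List.pyRange 0 (m : Int) 1).map (fun i => irow n i)
      ++ (PySem.List.pyRange (m : Int) n 1).map (fun _j => zrow n) := by
  induction m with
  | zero => simp [PySem.List.pyRange_one_eq_nil]
  | succ m ih =>
    have hm' : (m : Int) ≤ n := by push_cast at hm; omega
    rw [show ((m + 1 : ℕ) : Int) = (m : Int) + 1 by push_cast; ring]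
    rw [PySem.List.pyRange_one_succ_right (by omega : (0:Int) ≤ (m:Int))]
    rw [List.foldl_append, List.map_append, ih hm']
    have hcons : PySem.List.pyRange (m : Int) n 1 = (m : Int) :: PySem.List.pyRange ((m : Int) + 1) n 1 :=
      PySem.List.pyRange_one_cons (by push_cast at hm; omega)
    have hget : PySem.List.pyGetD
        ((PySem.List.pyRange 0 (m : Int) 1).map (fun i => irow n i)
          ++ (PySem.List.pyRange (m : Int) n 1).map (fun _j => zrow n)) (m : Int) [] = zrow n := by
      rw [hcons]
      simp [PySem.List.pyGetD_natCast, PySem.List.length_pyRange_one]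
    rw [List.foldl_cons, List.foldl_nil,
      inner_loop_eq n (m : Int) (by omega) (by push_cast at hm; omega) _ hget]
    rw [hcons]
    simp [PySem.List.length_pyRange_one]

-- formatting one identity row token by token agrees with B's inner loop
theorem row_string_eq (n i : Int) (res : String) :
    (irow n i).foldl (fun r j => r ++ PySem.Int.toStr j ++ " ") res
      = (PySem.List.pyRange 0 n 1).foldl (fun r j => r ++ (if j == i then "1 " else "0 ")) res := by
  unfold irow
  rw [List.foldl_map]
  congr 1
  funext r j
  by_cases h : j == i <;> simp [h, PySem.Int.toStr, String.append_assoc] <;> rfl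

-- ===== VERDICT (by name: the statement is the Claim_ definition above) =====
theorem f_spec : Claim_equal_f := by
  intro n _
  simp only [Spec_f, f, f_alt]
  by_cases hn : n ≤ 0
  · simp [PySem.List.pyRange_one_eq_nil hn]
  · rw [show (PySem.List.pyRange 0 n 1).map (fun _i => (0 : Int)) = zrow n from rfl]
    have hlen : ((((PySem.List.pyRange 0 n 1).map (fun _j => zrow n)).length : Nat) : Int)
        = ((n.toNat : Nat) : Int) := by
      simp [PySem.List.length_pyRange_one]
    rw [hlen, outer_loop_eq n n.toNat (by omega)]
    rw [show ((n.toNat : Nat) : Int) = n by omega]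
    rw [PySem.List.pyRange_one_eq_nil (le_refl n), List.map_nil, List.append_nil]
    rw [List.foldl_map]
    congr 1
    funext res i
    rw [row_string_eq]
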